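/- GENERATED by tools/from_farm_form.py from prooffarm-gif/accepted/DGifGetScreenDesc.6/Proof.lean (a worked proof of the farm's unit `DGifGetScreenDesc.6`,
   accepted by the verdict) — do not edit. -/
import Gif.Spec.Units.DGifGetScreenDesc_6
import Gif.Spec.AllSegs
import Gif.Spec.Proved.DGifGetScreenDesc_6_Lemmas

open X86 X86.User Asan ProgX.Base ProgX.Base.Spec Gif.Spec

/-!
  `DGifGetScreenDesc.6` (108284H … 108253H, 34 instructions; dgif_lib.c:296-298 and `i++`): one round of the colour loop behind the
  successful read: the three checked byte stores `Colors[i].Red / Green / Blue`, then back to the loop head with the measure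
  `m − 1`. The walk and the carry of the loop invariant are in Lemmas.lean (`sd6_seg`, `sd6_carry`, `sd6_where`).
-/

namespace Gif.Spec.DGifGetScreenDesc_6
end Gif.Spec.DGifGetScreenDesc_6

/-- Segment 6 of `DGifGetScreenDesc` takes `InLoop m` at 108284H to `Head m'` at 108253H for an `m' < m`. -/
theorem Gif.Spec.Proved.DGifGetScreenDesc_6_ok : Gif.Spec.DGifGetScreenDesc_6.Statement := by
  intro Lay hLay μ hμ u₀ hcode h_asan_load8_noabort h_asan_store1_noabort H rest frames F R Hc mp m e ret v hat
  exact Gif.Spec.DGifGetScreenDesc_6.sd6_seg Lay hLay μ hμ u₀ hcode h_asan_load8_noabort h_asan_store1_noabort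
    H rest frames F R Hc mp m e ret v hat
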